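-- pv_equiv track=rewrite | github.com/esgv-junk/pyforge | pyforge/iter.py | group_k_forward
-- ===== SOURCE A (Python) =====
-- import itertools
-- import collections
--
-- def eat(seq, n=None):
--     if n is None:
--         collections.deque(seq, maxlen=0)
--     else:
--         next(itertools.islice(seq, n, n), None)
--
-- def group_k_forward(seq, lookahead=1, end_padding=None):
--     safe_seq = seq
--     if not (end_padding is None):
--         safe_seq = itertools.chain(
--             seq,
--             itertools.repeat(end_padding, lookahead)
--         )
--
--     context = itertools.tee(safe_seq, lookahead + 1)
--     for i in range(lookahead + 1):
--         eat(context[i], i)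
--     return zip(*context)
-- ===== SOURCE B (Python) =====
-- import itertools
-- import collections
--
-- def group_k_forward(seq, lookahead=1, end_padding=None):
--     safe_seq = seq
--     if not (end_padding is None):
--         safe_seq = itertools.chain(
--             seq,
--             itertools.repeat(end_padding, lookahead)
--         )
--     it = iter(safe_seq)
--     window = collections.deque(itertools.islice(it, lookahead),
--                                maxlen=lookahead + 1)
--     def gen():
--         for x in it:
--             window.append(x)
--             yield tuple(window)
--     return gen()
-- ===== Notes on version B (the rewrite author's own statement) =====
-- stated objective: idiomatic
-- what changed: Replaces the lookahead+1 staggered tee/zip iterators with a single-pass deque sliding window (deque(maxlen=lookahead+1) primed by islice), yielding a tuple per further element.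
-- outside the precondition, e.g. on group_k_forward([1, 2], -1, None): A returns [], B raises ValueError
import Mathlib
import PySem

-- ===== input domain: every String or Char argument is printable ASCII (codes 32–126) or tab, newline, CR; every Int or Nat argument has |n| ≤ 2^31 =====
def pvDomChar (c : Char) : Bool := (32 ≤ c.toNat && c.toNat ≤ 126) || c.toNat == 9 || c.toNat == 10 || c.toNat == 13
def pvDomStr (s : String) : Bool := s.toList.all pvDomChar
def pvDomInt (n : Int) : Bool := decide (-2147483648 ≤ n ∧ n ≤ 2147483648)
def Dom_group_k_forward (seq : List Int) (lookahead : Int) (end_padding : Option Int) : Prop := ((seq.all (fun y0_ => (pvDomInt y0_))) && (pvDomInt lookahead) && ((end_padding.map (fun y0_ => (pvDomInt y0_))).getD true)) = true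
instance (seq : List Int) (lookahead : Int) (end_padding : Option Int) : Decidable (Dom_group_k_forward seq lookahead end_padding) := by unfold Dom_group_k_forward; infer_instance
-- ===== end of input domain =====

-- B replaces A's lookahead+1 staggered tee/zip iterators with one deque-style sliding
-- window maintained in a single pass; same values, no speed claim.

-- the common first lines of both Pythons: pad the sequence when end_padding is given
def padSeq (seq : List Int) (lookahead : Int) (end_padding : Option Int) : List Int :=
  match end_padding with
  | none => seq
  | some p => seq ++ List.replicate lookahead.toNat p

-- ===== PORT A =====
-- termination helpers for pyZip (cited by its decreasing_by)
theorem pv_sum_tail_le (ls : List (List Int)) :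
    ((ls.map List.tail).map List.length).sum ≤ (ls.map List.length).sum := by
  induction ls with
  | nil => simp
  | cons a as ih =>
    simp only [List.map_cons, List.sum_cons, List.length_tail]
    omega

theorem pv_sum_tail_lt (ls : List (List Int)) (h1 : ls ≠ [])
    (h2 : ls.any List.isEmpty = false) :
    ((ls.map List.tail).map List.length).sum < (ls.map List.length).sum := by
  cases ls with
  | nil => exact absurd rfl h1
  | cons a as =>
    have ha : a ≠ [] := by
      intro h; subst h; simp at h2
    have h3 := pv_sum_tail_le as
    have h5 : 0 < a.length := List.length_pos_iff.mpr ha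
    simp only [List.map_cons, List.sum_cons, List.length_tail]
    omega

-- Python's zip(*iters): stops at the first exhausted iterator; zip() of no iterators is empty.
def pyZip (ls : List (List Int)) : List (List Int) :=
  if h1 : ls = [] then []
  else if h2 : ls.any List.isEmpty then []
  else (ls.map List.headI) :: pyZip (ls.map List.tail)
termination_by (ls.map List.length).sum
decreasing_by have := pv_sum_tail_lt ls h1 (Bool.eq_false_iff.mpr h2); simpa using this

def group_k_forward (seq : List Int) (lookahead : Int) (end_padding : Option Int) : List (List Int) :=
  -- tee(safe_seq, lookahead+1), then eat(context[i], i) advances copy i by i elements,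
  -- and zip(*context) is pyZip of those dropped copies.
  pyZip ((List.range (lookahead + 1).toNat).map
    (fun i => (padSeq seq lookahead end_padding).drop i))

-- ===== PORT B =====
-- deque(…, maxlen=cap): appending past cap drops from the left; each loop step appends
-- one element and yields the window's contents.
def slideGo (cap : Nat) (window : List Int) : List Int → List (List Int)
  | [] => []
  | x :: xs =>
      let w := window ++ [x]
      let w' := w.drop (w.length - cap)
      w' :: slideGo cap w' xs

def group_k_forward_alt (seq : List Int) (lookahead : Int) (end_padding : Option Int) : List (List Int) :=
  -- islice(it, lookahead) primes the window; the generator walks the rest of the iterator.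
  slideGo (lookahead + 1).toNat
    ((padSeq seq lookahead end_padding).take lookahead.toNat)
    ((padSeq seq lookahead end_padding).drop lookahead.toNat)

-- ===== PRECONDITION & SPEC =====
-- Pre_ excludes negative lookahead: A raises ValueError (from tee) for lookahead ≤ -2, and at
-- lookahead = -1 A returns an accidental empty zip() while B's islice raises ValueError.
def Pre_group_k_forward (seq : List Int) (lookahead : Int) (end_padding : Option Int) : Prop :=
  0 ≤ lookahead
instance (seq : List Int) (lookahead : Int) (end_padding : Option Int) : Decidable (Pre_group_k_forward seq lookahead end_padding) := by unfold Pre_group_k_forward; infer_instance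

def pvWitness_group_k_forward : List Int × Int × Option Int := ([1, 2, 3], 1, none)

def Spec_group_k_forward (seq : List Int) (lookahead : Int) (end_padding : Option Int) (out : List (List Int)) : Prop := out = group_k_forward_alt seq lookahead end_padding
instance (seq : List Int) (lookahead : Int) (end_padding : Option Int) (out : List (List Int)) : Decidable (Spec_group_k_forward seq lookahead end_padding out) := by unfold Spec_group_k_forward; infer_instance

-- ===== CLAIM (what is proved, stated in full; the proofs are below) =====
def Claim_equal_group_k_forward : Prop := ∀ (seq : List Int) (lookahead : Int) (end_padding : Option Int), Dom_group_k_forward seq lookahead end_padding → Pre_group_k_forward seq lookahead end_padding → Spec_group_k_forward seq lookahead end_padding (group_k_forward seq lookahead end_padding)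

-- ===== LEMMAS AND PROOFS =====

-- zip of the k+1 staggered drops of s
def zd (k : Nat) (s : List Int) : List (List Int) :=
  pyZip ((List.range (k + 1)).map (fun i => s.drop i))

theorem zd_short (k : Nat) (s : List Int) (h : s.length ≤ k) : zd k s = [] := by
  unfold zd
  rw [pyZip.eq_def]
  have hany : ((List.range (k + 1)).map (fun i => s.drop i)).any List.isEmpty = true := by
    simp only [List.any_map, List.any_eq_true]
    exact ⟨k, by simp, by simp [Function.comp, List.isEmpty_iff, List.drop_eq_nil_iff, h]⟩
  have hne : (List.range (k + 1)).map (fun i => s.drop i) ≠ [] := by simp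
  simp [hne, hany]

theorem zd_cons (k : Nat) (s : List Int) (h : k < s.length) :
    zd k s = s.take (k + 1) :: zd k s.tail := by
  unfold zd
  rw [pyZip.eq_def]
  have hne : (List.range (k + 1)).map (fun i => s.drop i) ≠ [] := by simp
  have hany : ((List.range (k + 1)).map (fun i => s.drop i)).any List.isEmpty = false := by
    simp only [List.any_map, List.any_eq_false]
    intro i hi
    simp only [List.mem_range] at hi
    simp only [Function.comp, List.isEmpty_iff, List.drop_eq_nil_iff]
    omega
  rw [dif_neg hne, dif_neg (by simp [hany])]
  congr 1
  · -- heads = s.take (k+1)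
    apply List.ext_getElem
    · simp only [List.length_map, List.length_range, List.length_take]; omega
    · intro i h1 h2
      simp only [List.getElem_map, List.getElem_range, List.getElem_take]
      have hi : i < s.length := by
        simp only [List.length_map, List.length_range] at h1; omega
      rw [List.drop_eq_getElem_cons hi, List.headI_cons]
  · -- tails = drops of s.tail
    congr 1
    rw [List.map_map]
    apply List.map_congr_left
    intro i hi
    simp only [Function.comp]
    rw [List.tail_drop, List.drop_tail]

theorem slideGo_eq (k : Nat) (rest : List Int) :
    ∀ t : List Int, k ≤ t.length →
      slideGo (k + 1) (t.drop (t.length - (k + 1))) rest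
        = zd k (t.drop (t.length - k) ++ rest) := by
  induction rest with
  | nil =>
    intro t ht
    rw [slideGo, zd_short]
    simp; omega
  | cons x xs ih =>
    intro t ht
    rw [slideGo]
    have e1 : t.drop (t.length - (k + 1)) ++ [x] = (t ++ [x]).drop (t.length - (k + 1)) := by
      rw [List.drop_append_of_le_length (by omega)]
    have hwlen : (t.drop (t.length - (k + 1)) ++ [x]).length = (t ++ [x]).length - (k + 1) + (k + 1) - (t.length - (k+1)) := by
      simp; omega
    have e2 : (t.drop (t.length - (k + 1)) ++ [x]).drop
        ((t.drop (t.length - (k + 1)) ++ [x]).length - (k + 1))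
        = (t ++ [x]).drop ((t ++ [x]).length - (k + 1)) := by
      rw [e1, List.drop_drop]
      congr 1
      simp only [List.length_append, List.length_drop, List.length_cons]
      omega
    have e3 : (t ++ [x]).drop ((t ++ [x]).length - (k + 1))
        = t.drop (t.length - k) ++ [x] := by
      have h9 : (t ++ [x]).length - (k + 1) = t.length - k := by
        simp only [List.length_append, List.length_cons, List.length_nil]; omega
      rw [h9, List.drop_append_of_le_length (by omega)]
    have hlen : k < (t.drop (t.length - k) ++ x :: xs).length := by
      simp only [List.length_append, List.length_drop, List.length_cons]; omega
    rw [zd_cons k _ hlen]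
    have htake : (t.drop (t.length - k) ++ x :: xs).take (k + 1)
        = t.drop (t.length - k) ++ [x] := by
      rw [List.take_append]
      rw [List.take_of_length_le (by simp only [List.length_drop]; omega)]
      congr 1
      have h9 : k + 1 - (t.drop (t.length - k)).length = 1 := by
        simp only [List.length_drop]; omega
      rw [h9]
      rfl
    have htail : (t.drop (t.length - k) ++ x :: xs).tail
        = (t ++ [x]).drop ((t ++ [x]).length - k) ++ xs := by
      rcases Nat.eq_zero_or_pos k with hk | hk
      · subst hk
        simp
      · rw [List.tail_append_of_ne_nil (by simp [List.drop_eq_nil_iff]; omega)]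
        rw [List.tail_drop]
        have : (t ++ [x]).length - k = t.length + 1 - k := by simp
        rw [this, List.drop_append_of_le_length (by omega)]
        have h2 : t.length - k + 1 = t.length + 1 - k := by omega
        rw [h2, List.append_assoc]
        rfl
    rw [htake, htail, e2, e3]
    have ih' := ih (t ++ [x]) (by simp; omega)
    rw [← e3, ih']

-- ===== VERDICT (by name: the statement is the Claim_ definition above) =====
theorem group_k_forward_spec : Claim_equal_group_k_forward := by
  intro seq lookahead end_padding _ hpre
  have hla : 0 ≤ lookahead := hpre
  unfold Spec_group_k_forward group_k_forward group_k_forward_alt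
  have hk : (lookahead + 1).toNat = lookahead.toNat + 1 := by omega
  set k := lookahead.toNat with hkdef
  set safe : List Int := padSeq seq lookahead end_padding with hsafe
  rw [hk]
  show zd k safe = slideGo (k + 1) (safe.take k) (safe.drop k)
  by_cases hlen : k ≤ safe.length
  · have hlt : (safe.take k).length = k := by
      simp only [List.length_take]; omega
    have h := slideGo_eq k (safe.drop k) (safe.take k) (by omega)
    rw [hlt] at h
    rw [Nat.sub_self, List.drop_zero] at h
    rw [show k - (k + 1) = 0 from by omega, List.drop_zero] at h
    rw [List.take_append_drop] at h
    exact h.symm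
  · have h2 : safe.drop k = [] := List.drop_eq_nil_iff.mpr (by omega)
    rw [h2, slideGo]
    exact zd_short k safe (by omega)
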